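-- pv_equiv track=rewrite | github.com/rebuilder945/FL_research | ast_research/python_code_5.23/lastterm_page10/success_code/王祈皓-2769-2023-05-29_16_39_44.py | decrypt_password
-- ===== SOURCE A (Python) =====
-- def decrypt_password(password):
--     original_text = ""
--     for char in password:
--         if char.isupper():
--             original_text += chr(155 - ord(char))
--         elif char.islower():
--             original_text += chr(219 - ord(char))
--         else:
--             original_text += char
--     return original_text
-- ===== SOURCE B (Python) =====
-- _UPPER = "ABCDEFGHIJKLMNOPQRSTUVWXYZ"
-- _LOWER = "abcdefghijklmnopqrstuvwxyz"
-- _TABLE = str.maketrans(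
--     _UPPER + _LOWER,
--     "".join(chr(155 - ord(c)) for c in _UPPER)
--     + "".join(chr(219 - ord(c)) for c in _LOWER),
-- )
--
--
-- def decrypt_password(password):
--     return password.translate(_TABLE)
-- ===== Notes on version B (the rewrite author's own statement) =====
-- stated objective: idiomatic
-- what changed: Replaces the per-character branch-and-concatenate loop with a translation table built once from the ASCII alphabets and a single str.translate pass.
import Mathlib
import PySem

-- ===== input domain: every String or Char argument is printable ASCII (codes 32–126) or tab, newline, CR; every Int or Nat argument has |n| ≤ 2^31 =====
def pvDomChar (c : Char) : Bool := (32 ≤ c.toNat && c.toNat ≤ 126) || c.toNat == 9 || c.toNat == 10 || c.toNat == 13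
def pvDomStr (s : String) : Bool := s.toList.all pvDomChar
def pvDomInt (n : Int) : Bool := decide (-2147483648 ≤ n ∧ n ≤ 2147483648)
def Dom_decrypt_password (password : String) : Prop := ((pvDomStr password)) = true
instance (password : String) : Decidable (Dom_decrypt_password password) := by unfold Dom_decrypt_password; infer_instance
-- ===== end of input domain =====

-- B replaces A's per-character branch loop with a code-point translation table
-- (Python str.maketrans/translate) built once and applied in a single map pass (objective: idiomatic).


-- ===== PORT A =====
-- chr(155 - ord(char)) / chr(219 - ord(char)) are ported with Nat subtraction: exact in the
-- branch where they run, since isupper/islower bound ord(char) from above (90 resp. 122).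
def decrypt_password (password : String) : String :=
  String.mk (password.toList.foldl
    (fun acc c =>
      acc ++ [if PySem.Chars.isupper c then Char.ofNat (155 - c.toNat)
              else if PySem.Chars.islower c then Char.ofNat (219 - c.toNat)
              else c]) [])

-- ===== PORT B =====
-- str.maketrans(x, y): a dict keyed by code point; str.translate: per-character lookup,
-- characters absent from the table are kept.
def pvUpper : List Char := "ABCDEFGHIJKLMNOPQRSTUVWXYZ".toList
def pvLower : List Char := "abcdefghijklmnopqrstuvwxyz".toList
def pvTable : PySem.Dict Int Char :=
  PySem.Dict.ofList
    (pvUpper.map (fun c => ((c.toNat : Int), Char.ofNat (155 - c.toNat))) ++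
     pvLower.map (fun c => ((c.toNat : Int), Char.ofNat (219 - c.toNat))))

def decrypt_password_alt (password : String) : String :=
  String.mk (password.toList.map (fun c => pvTable.getD ((c.toNat : Int)) c))

-- ===== PRECONDITION & SPEC =====
def Spec_decrypt_password (password : String) (out : String) : Prop := out = decrypt_password_alt password
instance (password : String) (out : String) : Decidable (Spec_decrypt_password password out) := by unfold Spec_decrypt_password; infer_instance

-- ===== CLAIM (what is proved, stated in full; the proofs are below) =====
def Claim_equal_decrypt_password : Prop := ∀ (password : String), Dom_decrypt_password password → Spec_decrypt_password password (decrypt_password password)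

-- ===== LEMMAS AND PROOFS =====
set_option maxRecDepth 4000

-- the translation table, characterised on all ASCII code points
theorem pvTable_get : ∀ n : Nat, n < 128 →
    pvTable.get? (n : Int) =
      if 65 ≤ n ∧ n ≤ 90 then some (Char.ofNat (155 - n))
      else if 97 ≤ n ∧ n ≤ 122 then some (Char.ofNat (219 - n))
      else none := by decide

theorem pv_foldl_append {α β : Type} (f : α → β) :
    ∀ (l : List α) (acc : List β),
      l.foldl (fun acc c => acc ++ [f c]) acc = acc ++ l.map f := by
  intro l
  induction l with
  | nil => simp
  | cons c t ih => intro acc; simp [List.foldl, ih]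

theorem pv_step (c : Char) (h : pvDomChar c = true) :
    (if PySem.Chars.isupper c then Char.ofNat (155 - c.toNat)
     else if PySem.Chars.islower c then Char.ofNat (219 - c.toNat)
     else c) = pvTable.getD ((c.toNat : Int)) c := by
  have hn : c.toNat < 128 := by
    simp only [pvDomChar, Bool.or_eq_true, Bool.and_eq_true, decide_eq_true_eq,
      beq_iff_eq] at h
    omega
  have hu : PySem.Chars.isupper c = true ↔ (65 ≤ c.toNat ∧ c.toNat ≤ 90) := by
    simp only [PySem.Chars.isupper, Bool.and_eq_true, decide_eq_true_eq]
    constructor <;> exact fun h => ⟨h.1, h.2⟩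
  have hl : PySem.Chars.islower c = true ↔ (97 ≤ c.toNat ∧ c.toNat ≤ 122) := by
    simp only [PySem.Chars.islower, Bool.and_eq_true, decide_eq_true_eq]
    constructor <;> exact fun h => ⟨h.1, h.2⟩
  rw [PySem.Dict.getD, pvTable_get c.toNat hn]
  by_cases h1 : 65 ≤ c.toNat ∧ c.toNat ≤ 90
  · rw [if_pos h1, if_pos (hu.mpr h1)]; rfl
  · rw [if_neg h1, if_neg (by intro hc; exact h1 (hu.mp hc))]
    by_cases h2 : 97 ≤ c.toNat ∧ c.toNat ≤ 122
    · rw [if_pos h2, if_pos (hl.mpr h2)]; rfl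
    · rw [if_neg h2, if_neg (by intro hc; exact h2 (hl.mp hc))]; rfl

-- ===== VERDICT (by name: the statement is the Claim_ definition above) =====
theorem decrypt_password_spec : Claim_equal_decrypt_password := by
  intro password hdom
  unfold Spec_decrypt_password decrypt_password decrypt_password_alt
  rw [pv_foldl_append, List.nil_append]
  congr 1
  apply List.map_congr_left
  intro c hc
  exact pv_step c (by
    simp only [Dom_decrypt_password, pvDomStr, List.all_eq_true] at hdom
    exact hdom c hc)
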